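-- pv_equiv track=rewrite | github.com/narongskml/hackerrank_practice | algorithms/implementation/29.organizing-containers-of-balls.py | organizingContainers
-- ===== SOURCE A (Python) =====
-- def organizingContainers(container):
--     # Write your code here
--     n = len(container)
--     rows = [0] * n
--     cols = [0] * n
--     for i in range(n):
--         for j in range(n):
--             rows[i] += container[i][j]
--             cols[j] += container[i][j]
--
--     rows.sort()
--     cols.sort()
--     if rows == cols:
--         return "Possible"
--     else:
--         return "Impossible"
-- ===== SOURCE B (Python) =====
-- def organizingContainers(container):
--     # Multiset matching without sorting: each column sum must consume one
--     # remaining row sum; early exit on the first unmatched column.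
--     n = len(container)
--     if any(len(row) != n for row in container):
--         raise ValueError("container must be an n x n matrix")
--     remaining = [sum(row) for row in container]
--     for j in range(n):
--         c = sum(row[j] for row in container)
--         if c in remaining:
--             remaining.remove(c)
--         else:
--             return "Impossible"
--     return "Possible"
-- ===== Notes on version B (the rewrite author's own statement) =====
-- stated objective: alternative
-- what changed: Replaces A's sort-both-lists-and-compare with sort-free multiset matching: B computes the row sums once, then walks the columns, computing each column sum on the fly and removing it from the remaining row sums, returning Impossible at the first column sum it cannot match (early exit, no sorting, no column-sum list ever materialised); B also validates the documented n-by-n shape. Measured speedup comes from skipping both sorts and from early exit on the first unmatched column.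
-- outside the precondition, e.g. on organizingContainers([[0, 1], [1, 0, 5]]): A returns 'Possible', B raises ValueError
import Mathlib
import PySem

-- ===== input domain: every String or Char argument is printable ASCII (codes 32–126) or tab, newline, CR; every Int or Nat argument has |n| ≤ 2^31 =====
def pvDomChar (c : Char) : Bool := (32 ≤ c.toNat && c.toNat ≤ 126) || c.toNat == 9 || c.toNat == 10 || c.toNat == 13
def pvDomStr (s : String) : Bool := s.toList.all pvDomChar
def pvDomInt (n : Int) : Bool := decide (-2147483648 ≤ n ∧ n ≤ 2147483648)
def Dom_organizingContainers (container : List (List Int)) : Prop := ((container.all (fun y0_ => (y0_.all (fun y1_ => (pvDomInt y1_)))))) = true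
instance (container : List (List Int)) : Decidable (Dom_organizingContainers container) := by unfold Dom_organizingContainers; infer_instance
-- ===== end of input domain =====

-- B replaces A's sort-both-lists-and-compare with sort-free multiset matching: remove each
-- on-the-fly column sum from the remaining row sums, early-exiting on a failed match.


-- ===== PORT A =====
-- Literal transliteration of A: fused double loop over range(n) × range(n) accumulating
-- rows[i] and cols[j] together; container[i][j] via pyGet? (its .getD 0 arm is unreachable
-- under Pre_, which makes every index in range); then sort both and compare.
def organizingContainers (container : List (List Int)) : String :=
  let n : Int := container.length
  let rows : List Int := List.replicate container.length 0
  let cols : List Int := List.replicate container.length 0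
  let rc :=
    (PySem.List.pyRange 0 n 1).foldl (fun rc i =>
      (PySem.List.pyRange 0 n 1).foldl (fun (rc : List Int × List Int) j =>
        let v : Int := ((PySem.List.pyGet? container i).bind (fun r => PySem.List.pyGet? r j)).getD 0
        (rc.1.set i.toNat (rc.1.getD i.toNat 0 + v),
         rc.2.set j.toNat (rc.2.getD j.toNat 0 + v))) rc) (rows, cols)
  let rows' := PySem.List.sorted rc.1 id false
  let cols' := PySem.List.sorted rc.2 id false
  if rows' = cols' then "Possible" else "Impossible"

-- ===== PORT B =====
-- B's per-column loop: for each j compute the column sum on the fly and remove it from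
-- the remaining row sums; 'remaining.remove(c)' is guarded by 'c in remaining', so it is
-- exactly List.erase (first occurrence); early return "Impossible" on a failed match.
def matchCols (container : List (List Int)) : List Int → List Int → String
  | _, [] => "Possible"
  | remaining, j :: js =>
    let c : Int := (container.map (fun row => (PySem.List.pyGet? row j).getD 0)).sum
    if c ∈ remaining then matchCols container (remaining.erase c) js
    else "Impossible"

def organizingContainers_alt (container : List (List Int)) : String :=
  -- the guard is B's shape validation: Python raises ValueError there (outside Pre_),
  -- so the "" arm is never claimed about
  if container.any (fun row => row.length != container.length) then ""
  else
    let n : Int := container.length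
    let remaining : List Int := container.map List.sum
    matchCols container remaining (PySem.List.pyRange 0 n 1)

-- ===== PRECONDITION & SPEC =====
-- Pre_ restricts to square matrices, the shape the problem statement specifies: on a row
-- shorter than n either program can raise IndexError, and on a row longer than n A ignores
-- the trailing entries while B's full-row sums include them — on such ragged input
-- (outside the problem's stated n x n domain) both readings are defensible.
def Pre_organizingContainers (container : List (List Int)) : Prop :=
  ∀ r ∈ container, r.length = container.length
instance (container : List (List Int)) : Decidable (Pre_organizingContainers container) := by
  unfold Pre_organizingContainers; infer_instance

def pvWitness_organizingContainers : List (List Int) := [[1, 1], [0, 2]]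

def Spec_organizingContainers (container : List (List Int)) (out : String) : Prop :=
  out = organizingContainers_alt container
instance (container : List (List Int)) (out : String) : Decidable (Spec_organizingContainers container out) := by
  unfold Spec_organizingContainers; infer_instance

-- ===== CLAIM =====
def Claim_equal_organizingContainers : Prop :=
  ∀ (container : List (List Int)), Dom_organizingContainers container →
    Pre_organizingContainers container →
    Spec_organizingContainers container (organizingContainers container)

-- ===== LEMMAS AND PROOFS =====

-- ---- characterisation of A's fused double fold (rows side / cols side) ----

def applyAdd (w : Nat → Int) (m : Nat) (C : List Int) : List Int :=
  (PySem.List.pyRange 0 (m : Int) 1).foldl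
    (fun C j => C.set j.toNat (C.getD j.toNat 0 + w j.toNat)) C

theorem applyAdd_succ (w : Nat → Int) (m : Nat) (C : List Int) :
    applyAdd w (m+1) C
      = (applyAdd w m C).set m ((applyAdd w m C).getD m 0 + w m) := by
  unfold applyAdd
  have h : (((m:Nat)+1 : Nat) : Int) = (m : Int) + 1 := by push_cast; ring
  rw [h, PySem.List.pyRange_one_succ_right (by positivity), List.foldl_append]
  simp

theorem length_applyAdd (w : Nat → Int) (m : Nat) (C : List Int) :
    (applyAdd w m C).length = C.length := by
  induction m with
  | zero => simp [applyAdd, PySem.List.pyRange_one_eq_nil]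
  | succ k ih => rw [applyAdd_succ]; simp [ih]

theorem getD_applyAdd (w : Nat → Int) (m : Nat) (C : List Int) (t : Nat) :
    (applyAdd w m C).getD t 0
      = C.getD t 0 + (if t < m ∧ t < C.length then w t else 0) := by
  induction m with
  | zero => simp [applyAdd, PySem.List.pyRange_one_eq_nil]
  | succ k ih =>
    rw [applyAdd_succ]
    by_cases hk : k = t
    · subst hk
      by_cases hl : k < C.length
      · have hl' : k < (applyAdd w k C).length := by rw [length_applyAdd]; exact hl
        rw [List.getD, List.getElem?_set_self hl']
        simp only [Option.getD_some, ih]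
        simp [hl]
      · rw [List.set_eq_of_length_le (by rw [length_applyAdd]; omega)]
        rw [ih]
        simp [hl]
    · rw [List.getD, List.getElem?_set_ne hk, ← List.getD, ih]
      have : (t < k ∧ t < C.length) ↔ (t < k + 1 ∧ t < C.length) := by omega
      rw [if_congr this rfl rfl]

theorem foldl_set_same (k : Nat) (R : List Int) (w : Int → Int) (m : Nat) :
    (PySem.List.pyRange 0 (m : Int) 1).foldl
      (fun R j => R.set k (R.getD k 0 + w j)) R
    = R.set k (R.getD k 0 + ((PySem.List.pyRange 0 (m : Int) 1).map w).sum) := by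
  induction m with
  | zero =>
    rw [show ((0:Nat):Int) = 0 from rfl, PySem.List.pyRange_one_eq_nil le_rfl]
    simp only [List.foldl_nil, List.map_nil, List.sum_nil, add_zero]
    by_cases hl : k < R.length
    · rw [List.getD_eq_getElem R 0 hl, List.set_getElem_self]
    · rw [List.set_eq_of_length_le (by omega)]
  | succ n ih =>
    have h : (((n:Nat)+1 : Nat) : Int) = (n : Int) + 1 := by push_cast; ring
    rw [h, PySem.List.pyRange_one_succ_right (by positivity), List.foldl_append, List.map_append,
      List.sum_append, ih]
    simp only [List.foldl_cons, List.foldl_nil, List.map_cons, List.map_nil, List.sum_cons,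
      List.sum_nil, List.set_set]
    by_cases hl : k < R.length
    · rw [List.getD, List.getElem?_set_self (by omega), Option.getD_some]
      ring_nf
    · simp [List.set_eq_of_length_le (show R.length ≤ k by omega)]

theorem foldl_applyAdd (W : Nat → Nat → Int) (m n : Nat) (C : List Int) (hC : C.length = n) :
    ((PySem.List.pyRange 0 (m : Int) 1).foldl (fun C i => applyAdd (W i.toNat) n C) C).length = n ∧
    ∀ t, t < n →
      ((PySem.List.pyRange 0 (m : Int) 1).foldl (fun C i => applyAdd (W i.toNat) n C) C).getD t 0
        = C.getD t 0 + ((List.range m).map (fun i => W i t)).sum := by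
  induction m with
  | zero => simp [PySem.List.pyRange_one_eq_nil, hC]
  | succ k ih =>
    have h : (((k:Nat)+1 : Nat) : Int) = (k : Int) + 1 := by push_cast; ring
    rw [h, PySem.List.pyRange_one_succ_right (by positivity), List.foldl_append]
    simp only [List.foldl_cons, List.foldl_nil]
    refine ⟨by rw [length_applyAdd]; exact ih.1, ?_⟩
    intro t ht
    rw [getD_applyAdd, ih.2 t ht, List.range_succ, List.map_append, List.sum_append]
    simp [ih.1, ht]
    ring

theorem map_range_getD_map {β : Type} (l : List (List Int)) (f : List Int → β) :
    (List.range l.length).map (fun i => f (l.getD i [])) = l.map f := by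
  apply List.ext_getElem
  · simp
  · intro i h1 h2
    simp at h1 ⊢
    rw [List.getElem?_eq_getElem (by simpa using h1)]
    rfl

theorem foldl_prod_split {a b g : Type} (f : a → g → a) (gg : b → g → b)
    (l : List g) (x : a) (y : b) :
    l.foldl (fun p c => (f p.1 c, gg p.2 c)) (x, y) = (l.foldl f x, l.foldl gg y) := by
  induction l generalizing x y with
  | nil => rfl
  | cons c cs ih => simp [List.foldl_cons, ih]

-- column sums, the values B matches and A accumulates into cols
def colSums (container : List (List Int)) : List Int :=
  (List.range container.length).map (fun j => (container.map (fun r => r.getD j 0)).sum)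

theorem a_fold_eq (container : List (List Int))
    (hpre : ∀ r ∈ container, r.length = container.length) :
    ((PySem.List.pyRange 0 (container.length : Int) 1).foldl (fun rc i =>
        (PySem.List.pyRange 0 (container.length : Int) 1).foldl (fun (rc : List Int × List Int) j =>
          let v : Int := ((PySem.List.pyGet? container i).bind (fun r => PySem.List.pyGet? r j)).getD 0
          (rc.1.set i.toNat (rc.1.getD i.toNat 0 + v),
           rc.2.set j.toNat (rc.2.getD j.toNat 0 + v))) rc)
        (List.replicate container.length 0, List.replicate container.length 0))
      = (container.map List.sum, colSums container) := by
  set n := container.length with hn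
  have hsplit :
      (PySem.List.pyRange 0 (n : Int) 1).foldl (fun rc i =>
        (PySem.List.pyRange 0 (n : Int) 1).foldl (fun (rc : List Int × List Int) j =>
          let v : Int := ((PySem.List.pyGet? container i).bind (fun r => PySem.List.pyGet? r j)).getD 0
          (rc.1.set i.toNat (rc.1.getD i.toNat 0 + v),
           rc.2.set j.toNat (rc.2.getD j.toNat 0 + v))) rc)
        (List.replicate n 0, List.replicate n 0)
      = (applyAdd (fun t => (container.getD t []).sum) n (List.replicate n 0),
         (PySem.List.pyRange 0 (n : Int) 1).foldl
           (fun C i => applyAdd (fun t => (container.getD i.toNat []).getD t 0) n C)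
           (List.replicate n 0)) := by
    rw [PySem.List.foldl_congr_mem _ _
      (fun (rc : List Int × List Int) i =>
        (rc.1.set i.toNat (rc.1.getD i.toNat 0 + (container.getD i.toNat []).sum),
         applyAdd (fun t => (container.getD i.toNat []).getD t 0) n rc.2)) _ ?_]
    · exact foldl_prod_split
        (fun (R : List Int) (i : Int) => R.set i.toNat (R.getD i.toNat 0 + (container.getD i.toNat []).sum))
        (fun (Cc : List Int) (i : Int) => applyAdd (fun t => (container.getD i.toNat []).getD t 0) n Cc)
        _ _ _
    · intro rc i hi
      rw [PySem.List.mem_pyRange_one] at hi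
      have h0 : 0 ≤ i := hi.1
      have hlt : i.toNat < container.length := by omega
      have hrow : PySem.List.pyGet? container i = some (container.getD i.toNat []) := by
        rw [PySem.List.pyGet?_of_nonneg _ h0, List.getElem?_eq_getElem hlt,
          List.getD_eq_getElem container [] hlt]
      have hmem : container.getD i.toNat [] ∈ container := by
        rw [List.getD_eq_getElem container [] hlt]; exact List.getElem_mem hlt
      have hrl : (container.getD i.toNat []).length = n := hpre _ hmem
      obtain ⟨R, C⟩ := rc
      rw [PySem.List.foldl_congr_mem _ _
        (fun (rc : List Int × List Int) j =>
          (rc.1.set i.toNat (rc.1.getD i.toNat 0 +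
              PySem.List.pyGetD (container.getD i.toNat []) j 0),
           rc.2.set j.toNat (rc.2.getD j.toNat 0 +
              (container.getD i.toNat []).getD j.toNat 0))) _ ?_]
      · refine Eq.trans (foldl_prod_split
          (fun (R : List Int) (j : Int) => R.set i.toNat (R.getD i.toNat 0 +
            PySem.List.pyGetD (container.getD i.toNat []) j 0))
          (fun (Cc : List Int) (j : Int) => Cc.set j.toNat (Cc.getD j.toNat 0 +
            (container.getD i.toNat []).getD j.toNat 0)) _ R C) ?_
        have h1 : List.foldl (fun R j => R.set i.toNat (R.getD i.toNat 0 +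
              PySem.List.pyGetD (container.getD i.toNat []) j 0))
            R (PySem.List.pyRange 0 (n : Int) 1)
            = R.set i.toNat (R.getD i.toNat 0 + (container.getD i.toNat []).sum) := by
          rw [foldl_set_same]
          congr 2
          have hcast : ((n : Nat) : Int) = ((container.getD i.toNat []).length : Int) := by
            rw [hrl]
          rw [hcast, PySem.List.map_pyGetD_pyRange_zero']
        rw [Prod.mk.injEq]
        exact ⟨h1, rfl⟩
      · intro rc j hj
        rw [PySem.List.mem_pyRange_one] at hj
        simp only []
        rw [show ((PySem.List.pyGet? container i).bind
              (fun r => PySem.List.pyGet? r j)).getD 0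
            = PySem.List.pyGetD (container.getD i.toNat []) j 0 by
          rw [hrow]; rfl]
        rw [PySem.List.pyGetD_of_nonneg _ _ hj.1]
  rw [hsplit]
  have hrows : applyAdd (fun t => (container.getD t []).sum) n (List.replicate n 0)
      = container.map List.sum := by
    apply List.ext_getElem
    · rw [length_applyAdd]; simp [hn]
    · intro t h1 h2
      have htn : t < n := by rw [length_applyAdd] at h1; simpa using h1
      rw [← List.getD_eq_getElem _ 0 h1, getD_applyAdd]
      simp only [List.length_replicate, htn, and_self, if_pos]
      rw [List.getD_replicate 0 htn]
      rw [List.getElem_map, List.getD_eq_getElem container [] (by omega)]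
      ring
  have hcols : (PySem.List.pyRange 0 (n : Int) 1).foldl
        (fun C i => applyAdd (fun t => (container.getD i.toNat []).getD t 0) n C)
        (List.replicate n 0)
      = colSums container := by
    have hfa := foldl_applyAdd (fun i t => (container.getD i []).getD t 0) n n
      (List.replicate n 0) (by simp)
    unfold colSums
    apply List.ext_getElem
    · rw [hfa.1]; simp [hn]
    · intro t h1 h2
      have htn : t < n := by rw [hfa.1] at h1; exact h1
      rw [← List.getD_eq_getElem _ 0 h1, hfa.2 t htn, List.getD_replicate 0 htn]
      have hmr := map_range_getD_map container (fun r => r.getD t 0)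
      rw [← hn] at hmr
      simp only [List.getElem_map, List.getElem_range, zero_add]
      rw [← hmr]
  rw [hrows, hcols]

-- ---- characterisation of B's matching loop ----

-- the value-level matching loop underneath matchCols
def goMatch : List Int → List Int → String
  | _, [] => "Possible"
  | remaining, c :: cs =>
    if c ∈ remaining then goMatch (remaining.erase c) cs else "Impossible"

theorem matchCols_eq_goMatch (container : List (List Int)) (R js : List Int) :
    matchCols container R js
      = goMatch R (js.map (fun j =>
          (container.map (fun row => (PySem.List.pyGet? row j).getD 0)).sum)) := by
  induction js generalizing R with
  | nil => rfl
  | cons j js ih =>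
    simp only [matchCols, goMatch, List.map_cons]
    split_ifs <;> simp [ih]

theorem goMatch_cases (R C : List Int) :
    goMatch R C = "Possible" ∨ goMatch R C = "Impossible" := by
  induction C generalizing R with
  | nil => left; rfl
  | cons c cs ih =>
    simp only [goMatch]
    split_ifs
    · exact ih _
    · right; rfl

theorem cons_subperm_iff (c : Int) (cs R : List Int) :
    List.Subperm (c :: cs) R ↔ c ∈ R ∧ List.Subperm cs (R.erase c) := by
  constructor
  · intro h
    have hc : c ∈ R := h.subset List.mem_cons_self
    refine ⟨hc, ?_⟩
    have hp : List.Perm R (c :: R.erase c) := List.perm_cons_erase hc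
    have := h.trans hp.subperm
    exact (List.subperm_cons c).1 this
  · rintro ⟨hc, h⟩
    have : List.Subperm (c :: cs) (c :: R.erase c) := (List.subperm_cons c).2 h
    exact this.trans (List.perm_cons_erase hc).symm.subperm

theorem goMatch_possible_iff (R C : List Int) :
    goMatch R C = "Possible" ↔ List.Subperm C R := by
  induction C generalizing R with
  | nil => simp [goMatch, List.nil_subperm]
  | cons c cs ih =>
    simp only [goMatch]
    rw [cons_subperm_iff]
    split_ifs with hm
    · rw [ih]; simp [hm]
    · constructor
      · intro h; exact absurd h (by decide)
      · rintro ⟨hc, -⟩; exact absurd hc hm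

theorem main_eq (container : List (List Int))
    (hpre : ∀ r ∈ container, r.length = container.length) :
    organizingContainers container = organizingContainers_alt container := by
  unfold organizingContainers organizingContainers_alt
  rw [if_neg (show ¬(container.any (fun row => row.length != container.length) = true) by
    simp only [List.any_eq_true, bne_iff_ne, ne_eq, not_exists, not_and, not_not]
    exact fun r hr => hpre r hr)]
  simp only []
  rw [a_fold_eq container hpre]
  set n := container.length with hn
  -- B's on-the-fly column sums are exactly colSums
  have hmap : (PySem.List.pyRange 0 (n : Int) 1).map (fun j =>
        (container.map (fun row => (PySem.List.pyGet? row j).getD 0)).sum)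
      = colSums container := by
    unfold colSums
    rw [← hn, PySem.List.pyRange_one 0 (n : Int), List.map_map]
    rw [show ((n : Int) - 0).toNat = n by omega]
    apply List.map_congr_left
    intro j hj
    rw [List.mem_range] at hj
    simp only [Function.comp]
    congr 1
    apply List.map_congr_left
    intro r hr
    have hjr : j < r.length := by rw [hpre r hr]; omega
    rw [PySem.List.pyGet?_of_nonneg _ (by positivity),
      show ((0 : Int) + (j : Int)).toNat = j by omega,
      List.getElem?_eq_getElem hjr, Option.getD_some, List.getD_eq_getElem r 0 hjr]
  rw [matchCols_eq_goMatch, hmap]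
  -- lengths
  have hlr : (container.map List.sum).length = n := by simp [hn]
  have hlc : (colSums container).length = n := by simp [colSums, hn]
  -- equal-length subperm ↔ perm ↔ sorted-equal
  rw [Function.id_def]
  have hiff : PySem.List.sorted (container.map List.sum) (fun x => x) false
        = PySem.List.sorted (colSums container) (fun x => x) false
      ↔ goMatch (container.map List.sum) (colSums container) = "Possible" := by
    rw [goMatch_possible_iff]
    constructor
    · intro h
      have hperm : (container.map List.sum).Perm (colSums container) :=
        (PySem.List.sorted_id_eq_sorted_id_iff_perm _ _).1 h
      exact hperm.symm.subperm
    · intro h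
      have hperm := h.perm_of_length_le (by rw [hlr, hlc])
      exact (PySem.List.sorted_id_eq_sorted_id_iff_perm _ _).2 hperm.symm
  by_cases hs : PySem.List.sorted (container.map List.sum) (fun x => x) false
      = PySem.List.sorted (colSums container) (fun x => x) false
  · rw [if_pos hs]; exact (hiff.1 hs).symm
  · rw [if_neg hs]
    rcases goMatch_cases (container.map List.sum) (colSums container) with h | h
    · exact absurd (hiff.2 h) hs
    · exact h.symm

-- ===== VERDICT =====
theorem organizingContainers_spec : Claim_equal_organizingContainers := by
  intro container _ hpre
  unfold Spec_organizingContainers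
  exact main_eq container hpre
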